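-- pv_equiv track=rewrite | github.com/cjy13753/Study_DSAL | divconq/DivideAndConquer_04_sumFrom1ton.py | consecutive_sum
-- ===== SOURCE A (Python) =====
-- def consecutive_sum(start, end):
--     # 코드를 작성하세요
--     if start == end:
--         return start
--     else:
--         new_start1 = start
--         new_end1 = (start + end) // 2
--         new_start2 = new_end1 + 1
--         new_end2 = end
--         return consecutive_sum(new_start1, new_end1) + consecutive_sum(new_start2, new_end2)
-- ===== SOURCE B (Python) =====
-- def consecutive_sum(start, end):
--     # closed-form arithmetic series: O(1) instead of A's divide-and-conquer recursion
--     return (start + end) * (end - start + 1) // 2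
-- ===== Notes on version B (the rewrite author's own statement) =====
-- stated objective: faster
-- what changed: Replaced the divide-and-conquer recursion over the interval with the closed-form arithmetic-series formula (start+end)*(end-start+1)//2.
import Mathlib
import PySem

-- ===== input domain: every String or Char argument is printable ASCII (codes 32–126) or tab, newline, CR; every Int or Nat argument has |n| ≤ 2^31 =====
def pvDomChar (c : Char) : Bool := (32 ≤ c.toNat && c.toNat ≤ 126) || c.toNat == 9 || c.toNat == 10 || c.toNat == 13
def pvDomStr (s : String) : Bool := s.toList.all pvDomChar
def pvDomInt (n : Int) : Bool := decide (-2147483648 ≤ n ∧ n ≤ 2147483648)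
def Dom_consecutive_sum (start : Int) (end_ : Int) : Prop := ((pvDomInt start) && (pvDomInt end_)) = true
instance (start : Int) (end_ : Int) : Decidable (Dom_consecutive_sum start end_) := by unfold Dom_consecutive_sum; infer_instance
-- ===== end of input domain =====

-- B replaces A's divide-and-conquer recursion by the closed-form arithmetic-series
-- formula (start+end)*(end-start+1)//2 (O(1) instead of O(end-start)).


-- ===== PORT A =====
-- Literal port of A's recursion; the 'start < end_' test only makes the recursion
-- total in Lean (in Python, start > end_ recurses forever; Pre_ excludes it).
def consecutive_sum (start : Int) (end_ : Int) : Int :=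
  if start = end_ then start
  else if _h : start < end_ then
    let new_start1 := start
    let new_end1 := PySem.Int.floordiv (start + end_) 2
    let new_start2 := new_end1 + 1
    let new_end2 := end_
    consecutive_sum new_start1 new_end1 + consecutive_sum new_start2 new_end2
  else 0
termination_by (end_ - start).toNat
decreasing_by
  · have h2 : PySem.Int.floordiv (start + end_) 2 < end_ := by
      rw [PySem.Int.floordiv_lt_iff_lt_mul (by omega)]; omega
    omega
  · have h3 : start ≤ PySem.Int.floordiv (start + end_) 2 := by
      rw [PySem.Int.le_floordiv_iff_mul_le (by omega)]; omega
    omega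

-- ===== PORT B =====
def consecutive_sum_alt (start : Int) (end_ : Int) : Int :=
  PySem.Int.floordiv ((start + end_) * (end_ - start + 1)) 2

-- ===== PRECONDITION & SPEC =====
-- Pre_ excludes exactly start > end_, where Python's A recurses forever (RecursionError).
def Pre_consecutive_sum (start : Int) (end_ : Int) : Prop := start ≤ end_
instance (start : Int) (end_ : Int) : Decidable (Pre_consecutive_sum start end_) := by unfold Pre_consecutive_sum; infer_instance
def pvWitness_consecutive_sum : Int × Int := (1, 10)

def Spec_consecutive_sum (start : Int) (end_ : Int) (out : Int) : Prop := out = consecutive_sum_alt start end_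
instance (start : Int) (end_ : Int) (out : Int) : Decidable (Spec_consecutive_sum start end_ out) := by unfold Spec_consecutive_sum; infer_instance

-- ===== CLAIM =====
def Claim_equal_consecutive_sum : Prop := ∀ (start : Int) (end_ : Int), Dom_consecutive_sum start end_ → Pre_consecutive_sum start end_ → Spec_consecutive_sum start end_ (consecutive_sum start end_)

-- ===== LEMMAS AND PROOFS =====

-- (s+e)*(e-s+1) is even, so fdiv-by-2 doubles back exactly.
theorem two_mul_alt (s e : Int) : 2 * consecutive_sum_alt s e = (s + e) * (e - s + 1) := by
  unfold consecutive_sum_alt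
  have hev : Even ((s + e) * (e - s + 1)) := by
    rcases Int.even_or_odd (s + e) with h | h
    · exact h.mul_right _
    · have : Even (e - s + 1) := by
        rcases h with ⟨k, hk⟩; exact ⟨k + 1 - s, by omega⟩
      exact this.mul_left _
  obtain ⟨k, hk⟩ := hev
  have hP : (s + e) * (e - s + 1) = 2 * k := by omega
  have hd : PySem.Int.floordiv (2 * k) 2 = k := by
    rw [PySem.Int.floordiv_eq_iff_of_pos (by omega)]
    constructor <;> omega
  rw [hP, hd]

theorem consecutive_sum_eq_alt (s e : Int) (hle : s ≤ e) :
    consecutive_sum s e = consecutive_sum_alt s e := by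
  generalize hn : (e - s).toNat = n
  induction n using Nat.strong_induction_on generalizing s e with
  | _ n ih =>
    rw [consecutive_sum]
    by_cases h : s = e
    · subst h
      rw [if_pos rfl]
      have h2 : 2 * consecutive_sum_alt s s = 2 * s := by
        rw [two_mul_alt]; ring
      omega
    · have hlt : s < e := lt_of_le_of_ne hle h
      simp only [if_neg h, dif_pos hlt]
      set m := PySem.Int.floordiv (s + e) 2 with hm
      have hm1 : s ≤ m := by
        rw [hm, PySem.Int.le_floordiv_iff_mul_le (by omega)]; omega
      have hm2 : m < e := by
        rw [hm, PySem.Int.floordiv_lt_iff_lt_mul (by omega)]; omega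
      rw [ih (m - s).toNat (by omega) s m hm1 rfl,
          ih (e - (m + 1)).toNat (by omega) (m + 1) e (by omega) rfl]
      have t1 := two_mul_alt s m
      have t2 := two_mul_alt (m + 1) e
      have t3 := two_mul_alt s e
      have key : (s + m) * (m - s + 1) + ((m + 1) + e) * (e - (m + 1) + 1)
          = (s + e) * (e - s + 1) := by ring
      linarith

-- ===== VERDICT =====
theorem consecutive_sum_spec : Claim_equal_consecutive_sum := by
  intro s e _ hpre
  exact consecutive_sum_eq_alt s e hpre
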